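-- pv_equiv track=rewrite | github.com/Renrek/python-examples | statesByPartyAffiliation.py | statesControlledByParty
-- ===== SOURCE A (Python) =====
-- def statesControlledByParty(senatorList:list):
--     previousParty = ''
--     previousState = ''
--     republicans = 0
--     democrats = 0
--     independents = 0
--     for line in senatorList:
--         if line[1] == previousState and line[2] == previousParty:
--             if line[2] == 'R':
--                 republicans += 1
--             elif line[2] == 'D':
--                 democrats += 1
--             elif line[2] == 'I':
--                 independents += 1
--         previousState = line[1]
--         previousParty = line[2]
--     return {'republicans':republicans,
--             'democrats':democrats,
--             'independents':independents}
-- ===== SOURCE B (Python) =====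
-- def statesControlledByParty(senatorList: list):
--     # Two-pointer run scanner: find each maximal run of rows sharing (state, party);
--     # a run of length L contributes L - 1 pairs to its party's tally.
--     tally = {'R': 0, 'D': 0, 'I': 0}
--     n = len(senatorList)
--     i = 0
--     while i < n:
--         j = i + 1
--         while j < n and senatorList[j][1] == senatorList[i][1] \
--                 and senatorList[j][2] == senatorList[i][2]:
--             j += 1
--         p = senatorList[i][2]
--         if p in tally:
--             tally[p] += j - i - 1
--         i = j
--     return {'republicans': tally['R'],
--             'democrats': tally['D'],
--             'independents': tally['I']}
-- ===== Notes on version B (the rewrite author's own statement) =====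
-- stated objective: alternative
-- what changed: Replaces A's element-by-element pass with prev-state/prev-party accumulators and three named counters by a two-pointer run scanner: an outer loop advances over maximal runs of rows sharing (state, party), an inner pointer finds each run's end, and each run of length L contributes L-1 arithmetically to a keyed tally.
import Mathlib
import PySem

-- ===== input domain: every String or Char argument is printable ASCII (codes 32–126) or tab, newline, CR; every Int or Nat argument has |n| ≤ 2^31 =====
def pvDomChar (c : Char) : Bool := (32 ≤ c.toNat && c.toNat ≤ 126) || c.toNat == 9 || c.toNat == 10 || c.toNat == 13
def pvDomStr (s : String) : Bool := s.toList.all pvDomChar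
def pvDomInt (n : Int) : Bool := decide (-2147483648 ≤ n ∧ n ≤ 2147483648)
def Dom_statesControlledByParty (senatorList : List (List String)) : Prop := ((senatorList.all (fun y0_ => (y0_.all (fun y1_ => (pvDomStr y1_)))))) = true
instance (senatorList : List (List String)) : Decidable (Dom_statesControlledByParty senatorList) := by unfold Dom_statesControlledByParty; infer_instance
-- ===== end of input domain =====

-- B replaces A's element-by-element pass (prev-state/prev-party accumulators, three named
-- counters) by a two-pointer run scanner: each maximal run of equal (state, party) of
-- length L contributes L - 1 to a keyed tally (alternative decomposition, same cost).

-- ===== PORT A =====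
-- loop body of A (one iteration of the for-loop over senatorList)
def pvStepA (st : String × String × Int × Int × Int) (line : List String) : String × String × Int × Int × Int :=
  let ps := st.1; let pp := st.2.1
  let r := st.2.2.1; let d := st.2.2.2.1; let i := st.2.2.2.2
  let rdi :=
    if PySem.List.pyGetD line 1 "" == ps && PySem.List.pyGetD line 2 "" == pp then
      if PySem.List.pyGetD line 2 "" == "R" then (r + 1, d, i)
      else if PySem.List.pyGetD line 2 "" == "D" then (r, d + 1, i)
      else if PySem.List.pyGetD line 2 "" == "I" then (r, d, i + 1)
      else (r, d, i)
    else (r, d, i)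
  (PySem.List.pyGetD line 1 "", PySem.List.pyGetD line 2 "", rdi)

def statesControlledByParty (senatorList : List (List String)) : List (String × Int) :=
  let s := senatorList.foldl pvStepA ("", "", 0, 0, 0)
  [("republicans", s.2.2.1), ("democrats", s.2.2.2.1), ("independents", s.2.2.2.2)]

-- ===== PORT B =====
-- (state, party) of a row, i.e. (row[1], row[2])
def pvKey (row : List String) : String × String :=
  (PySem.List.pyGetD row 1 "", PySem.List.pyGetD row 2 "")

-- B's inner while loop: how far the pointer j advances past the run head (j - i - 1)
def pvLead (k : String × String) : List (List String) → Nat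
  | [] => 0
  | r :: t => if pvKey r = k then pvLead k t + 1 else 0

-- B's outer while loop: consume one maximal run, add its length - 1 to the tally, jump to j
def pvOuter (tally : PySem.Dict String Int) : List (List String) → PySem.Dict String Int
  | [] => tally
  | r :: rest =>
      let m := pvLead (pvKey r) rest
      let tally' :=
        if tally.contains (pvKey r).2 then
          tally.insert (pvKey r).2 (tally.getD (pvKey r).2 0 + (m : Int))
        else tally
      pvOuter tally' (rest.drop m)
  termination_by l => l.length
  decreasing_by simp

def statesControlledByParty_alt (senatorList : List (List String)) : List (String × Int) :=
  let tally := pvOuter (PySem.Dict.ofList [("R", 0), ("D", 0), ("I", 0)]) senatorList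
  [("republicans", tally.getD "R" 0), ("democrats", tally.getD "D" 0),
   ("independents", tally.getD "I" 0)]

-- ===== PRECONDITION & SPEC =====
-- Pre_ excludes exactly the inputs on which the Python A raises IndexError: a row with fewer
-- than 3 entries.
def Pre_statesControlledByParty (senatorList : List (List String)) : Prop :=
  ∀ line ∈ senatorList, 3 ≤ line.length
instance (senatorList : List (List String)) : Decidable (Pre_statesControlledByParty senatorList) := by unfold Pre_statesControlledByParty; infer_instance
def pvWitness_statesControlledByParty : List (List String) :=
  [["Smith", "NY", "D"], ["Jones", "NY", "D"], ["Lee", "CA", "R"]]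

def Spec_statesControlledByParty (senatorList : List (List String)) (out : List (String × Int)) : Prop := out = statesControlledByParty_alt senatorList
instance (senatorList : List (List String)) (out : List (String × Int)) : Decidable (Spec_statesControlledByParty senatorList out) := by unfold Spec_statesControlledByParty; infer_instance

-- ===== CLAIM (what is proved, stated in full; the proofs are below) =====
def Claim_equal_statesControlledByParty : Prop := ∀ (senatorList : List (List String)), Dom_statesControlledByParty senatorList → Pre_statesControlledByParty senatorList → Spec_statesControlledByParty senatorList (statesControlledByParty senatorList)

-- ===== LEMMAS AND PROOFS =====

-- the count A accumulates for party p, starting with previous (state, party) = prev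
def pvCnt (p : String) (prev : String × String) : List (List String) → Int
  | [] => 0
  | c :: t => (if pvKey c = prev ∧ (pvKey c).2 = p then 1 else 0) + pvCnt p (pvKey c) t

-- the run-based count B accumulates for party p
def pvRCnt (p : String) : List (List String) → Int
  | [] => 0
  | r :: rest =>
      (if (pvKey r).2 = p then (pvLead (pvKey r) rest : Int) else 0)
        + pvRCnt p (rest.drop (pvLead (pvKey r) rest))
  termination_by l => l.length
  decreasing_by simp

def pvLastSP (ps pp : String) : List (List String) → String × String
  | [] => (ps, pp)
  | c :: t => pvLastSP (pvKey c).1 (pvKey c).2 t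

lemma foldA_eq (l : List (List String)) : ∀ (ps pp : String) (r d i : Int),
    l.foldl pvStepA (ps, pp, r, d, i)
    = ((pvLastSP ps pp l).1, (pvLastSP ps pp l).2,
       r + pvCnt "R" (ps, pp) l, d + pvCnt "D" (ps, pp) l, i + pvCnt "I" (ps, pp) l) := by
  induction l with
  | nil => intro ps pp r d i; simp [pvLastSP, pvCnt]
  | cons c t ih =>
    intro ps pp r d i
    rw [List.foldl_cons]
    show List.foldl pvStepA (pvStepA (ps, pp, r, d, i) c) t = _
    simp only [pvStepA]
    by_cases hc : (PySem.List.pyGetD c 1 "" == ps && PySem.List.pyGetD c 2 "" == pp) = true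
    · rw [if_pos hc]
      simp only [Bool.and_eq_true, beq_iff_eq] at hc
      obtain ⟨h1, h2⟩ := hc
      subst h1; subst h2
      by_cases hR : PySem.List.pyGetD c 2 "" = "R"
      · rw [if_pos (by simpa using hR)]
        simp only [ih, pvLastSP, pvCnt, pvKey]
        simp [hR]
        ring_nf
      · rw [if_neg (by simpa using hR)]
        by_cases hD : PySem.List.pyGetD c 2 "" = "D"
        · rw [if_pos (by simpa using hD)]
          simp only [ih, pvLastSP, pvCnt, pvKey]
          simp [hD]
          ring_nf
        · rw [if_neg (by simpa using hD)]
          by_cases hI : PySem.List.pyGetD c 2 "" = "I"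
          · rw [if_pos (by simpa using hI)]
            simp only [ih, pvLastSP, pvCnt, pvKey]
            simp [hI]
            ring_nf
          · rw [if_neg (by simpa using hI)]
            simp only [ih, pvLastSP, pvCnt, pvKey]
            simp [hR, hD, hI]
    · rw [if_neg hc]
      simp only [Bool.and_eq_true, beq_iff_eq, not_and_or] at hc
      simp only [ih, pvLastSP, pvCnt, pvKey]
      simp
      have hk : ∀ (_ : PySem.List.pyGetD c 1 "" = ps) (_ : PySem.List.pyGetD c 2 "" = pp), False := by
        intro g1 g2; rcases hc with h | h; exact h g1; exact h g2
      exact ⟨fun g1 g2 _ => hk g1 g2, fun g1 g2 _ => hk g1 g2, fun g1 g2 _ => hk g1 g2⟩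

-- the head of what remains after a run differs from the run's key
lemma lead_drop_head : ∀ (rest : List (List String)) (k : String × String) (r' : List String),
    (rest.drop (pvLead k rest)).head? = some r' → pvKey r' ≠ k := by
  intro rest
  induction rest with
  | nil => intro k r' h; simp at h
  | cons x t ih =>
    intro k r' h
    by_cases hx : pvKey x = k
    · rw [pvLead, if_pos hx] at h
      simp only [List.drop_succ_cons] at h
      exact ih k r' h
    · rw [pvLead, if_neg hx] at h
      simp only [List.drop_zero, List.head?_cons, Option.some.injEq] at h
      exact h ▸ hx

-- splitting A's count at a maximal run whose key equals the previous (state, party)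
lemma cnt_run (p : String) : ∀ (rest : List (List String)) (k : String × String),
    pvCnt p k rest
      = (if k.2 = p then (pvLead k rest : Int) else 0)
        + pvCnt p k (rest.drop (pvLead k rest)) := by
  intro rest
  induction rest with
  | nil => intro k; simp [pvLead, pvCnt]
  | cons x t ih =>
    intro k
    by_cases hx : pvKey x = k
    · rw [pvLead, if_pos hx]
      simp only [List.drop_succ_cons]
      rw [pvCnt, hx, ih k]
      by_cases hp : k.2 = p
      · simp [hp]
        ring_nf
      · simp [hp]
    · rw [pvLead, if_neg hx]
      simp

-- A's count from a non-matching previous key equals B's run-based count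
lemma cnt_eq_rcnt (p : String) : ∀ (n : Nat) (rows : List (List String)), rows.length ≤ n →
    ∀ (prev : String × String),
    (∀ r', rows.head? = some r' → ¬ (pvKey r' = prev ∧ (pvKey r').2 = p)) →
    pvCnt p prev rows = pvRCnt p rows := by
  intro n
  induction n with
  | zero =>
    intro rows hn prev _
    have : rows = [] := List.eq_nil_of_length_eq_zero (Nat.le_zero.mp hn)
    subst this; simp [pvCnt, pvRCnt]
  | succ n ih =>
    intro rows hn prev hhead
    cases rows with
    | nil => simp [pvCnt, pvRCnt]
    | cons r rest =>
      rw [pvCnt, if_neg (hhead r rfl), pvRCnt]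
      rw [cnt_run p rest (pvKey r)]
      have hlen : (rest.drop (pvLead (pvKey r) rest)).length ≤ n := by
        simp only [List.length_drop]
        simp only [List.length_cons] at hn
        omega
      rw [ih _ hlen (pvKey r) (by
        intro r' h hcontr
        exact lead_drop_head rest (pvKey r) r' h hcontr.1)]
      ring

-- reading one party's tally out of B's outer run loop
lemma outer_getD : ∀ (n : Nat) (rows : List (List String)), rows.length ≤ n →
    ∀ (tally : PySem.Dict String Int) (p : String), tally.contains p = true →
    (pvOuter tally rows).getD p 0 = tally.getD p 0 + pvRCnt p rows := by
  intro n
  induction n with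
  | zero =>
    intro rows hn tally p _
    have : rows = [] := List.eq_nil_of_length_eq_zero (Nat.le_zero.mp hn)
    subst this; simp [pvOuter, pvRCnt]
  | succ n ih =>
    intro rows hn tally p hp
    cases rows with
    | nil => simp [pvOuter, pvRCnt]
    | cons r rest =>
      rw [pvOuter, pvRCnt]
      have hlen : (rest.drop (pvLead (pvKey r) rest)).length ≤ n := by
        simp only [List.length_drop]
        simp only [List.length_cons] at hn
        omega
      by_cases hc : tally.contains (pvKey r).2 = true
      · rw [if_pos hc]
        rw [ih _ hlen _ p (by
          rw [PySem.Dict.contains_insert]; simp [hp])]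
        rw [PySem.Dict.getD_insert]
        by_cases hpe : p = (pvKey r).2
        · rw [if_pos hpe, if_pos hpe.symm, hpe]; ring
        · rw [if_neg hpe, if_neg (fun h => hpe h.symm)]; ring
      · rw [if_neg hc]
        rw [ih _ hlen _ p hp]
        have : ¬ ((pvKey r).2 = p) := fun h => hc (h ▸ hp)
        rw [if_neg this]; ring

-- ===== VERDICT (by name: the statement is the Claim_ definition above) =====
theorem statesControlledByParty_spec : Claim_equal_statesControlledByParty := by
  intro l _ _
  show statesControlledByParty l = statesControlledByParty_alt l
  simp only [statesControlledByParty, statesControlledByParty_alt]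
  rw [foldA_eq]
  have hd0 : ∀ p : String, p ≠ "" →
      (∀ r', l.head? = some r' → ¬ (pvKey r' = ("", "") ∧ (pvKey r').2 = p)) := by
    rintro p hp r' _ ⟨hk, h2⟩
    exact hp (by rw [← h2, hk])
  rw [outer_getD l.length l le_rfl _ "R" (by decide),
      outer_getD l.length l le_rfl _ "D" (by decide),
      outer_getD l.length l le_rfl _ "I" (by decide),
      ← cnt_eq_rcnt "R" l.length l le_rfl ("", "") (hd0 "R" (by decide)),
      ← cnt_eq_rcnt "D" l.length l le_rfl ("", "") (hd0 "D" (by decide)),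
      ← cnt_eq_rcnt "I" l.length l le_rfl ("", "") (hd0 "I" (by decide))]
  simp [PySem.Dict.ofList]
  decide
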